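-- pv_equiv track=rewrite | github.com/fredrickkebaso/honeybee-MAGs | scripts/summarise_orthogroups.py | present_in
-- ===== SOURCE A (Python) =====
-- def present_in(gene_list, genomes, MAGs):
--     Isolates_present = True
--     if len(genomes) == 0:
--         Isolates_present = False
--     in_MAGs = False
--     in_Isolates = False
--     for gene in gene_list:
--         split_gene = gene.split('_')
--         genome_id = "_".join(split_gene[:-1])
--         if genome_id in MAGs:
--             in_MAGs = True
--         if Isolates_present:
--             if genome_id in genomes:
--                 in_Isolates = True
--         if in_Isolates and in_MAGs:
--             return("Both")
--     if in_Isolates: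
--         return("Isolates")
--     else:
--         if in_MAGs:
--             return("MAGs")
-- ===== SOURCE B (Python) =====
-- def present_in(gene_list, genomes, MAGs):
--     # Invert the traversal: hash-set of derived genome ids once, then scan the
--     # two genome collections checking membership in that set; classify by table.
--     ids = {"_".join(gene.split('_')[:-1]) for gene in gene_list}
--     in_MAGs = any(m in ids for m in MAGs)
--     in_Isolates = any(g in ids for g in genomes)
--     return {(True, True): "Both",
--             (False, True): "Isolates",
--             (True, False): "MAGs"}.get((in_MAGs, in_Isolates))
-- ===== Notes on version B (the rewrite author's own statement) =====
-- stated objective: faster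
-- what changed: Inverts the traversal: builds a hash set of the derived genome ids once, then scans MAGs and genomes checking membership in that set (instead of scanning MAGs/genomes once per gene), and classifies via a table lookup instead of an early-exit flag loop.
import Mathlib
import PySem

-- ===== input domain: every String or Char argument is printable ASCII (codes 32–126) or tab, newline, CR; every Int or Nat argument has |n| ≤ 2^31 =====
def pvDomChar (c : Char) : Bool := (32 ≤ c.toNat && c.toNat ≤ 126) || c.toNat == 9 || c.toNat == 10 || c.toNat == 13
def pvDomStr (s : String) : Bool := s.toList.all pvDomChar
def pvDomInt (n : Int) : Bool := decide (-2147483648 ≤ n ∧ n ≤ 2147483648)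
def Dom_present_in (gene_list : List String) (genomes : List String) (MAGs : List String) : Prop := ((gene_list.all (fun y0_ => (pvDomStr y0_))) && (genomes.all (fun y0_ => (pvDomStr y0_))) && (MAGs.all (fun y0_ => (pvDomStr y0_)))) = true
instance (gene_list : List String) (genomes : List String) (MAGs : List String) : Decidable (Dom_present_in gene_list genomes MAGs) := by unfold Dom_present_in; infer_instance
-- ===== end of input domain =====

-- B builds a set of the derived genome ids once and scans MAGs/genomes against it
-- (instead of scanning MAGs/genomes once per gene), classifying by table lookup.

-- shared helper: "_".join(gene.split('_')[:-1])  (split? is some here: the separator "_" is nonempty)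
def genomeId (gene : String) : String :=
  PySem.Str.join "_" (PySem.List.slice ((PySem.Str.split? gene "_").getD []) none (some (-1)))

-- ===== PORT A =====
-- the for-loop of A, carrying (in_MAGs, in_Isolates) and the early return "Both"
def presentLoopA (genomes MAGs : List String) (isolatesPresent : Bool) :
    List String → Bool → Bool → Option String
  | [], inM, inI =>
      if inI then some "Isolates" else if inM then some "MAGs" else none
  | gene :: rest, inM, inI =>
      let genome_id := genomeId gene
      let inM := if MAGs.contains genome_id then true else inM
      let inI := if isolatesPresent then (if genomes.contains genome_id then true else inI) else inI
      if inI && inM then some "Both"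
      else presentLoopA genomes MAGs isolatesPresent rest inM inI

def present_in (gene_list : List String) (genomes : List String) (MAGs : List String) : Option String :=
  let isolatesPresent := if genomes.length == 0 then false else true
  presentLoopA genomes MAGs isolatesPresent gene_list false false

-- ===== PORT B =====
def present_in_alt (gene_list : List String) (genomes : List String) (MAGs : List String) : Option String :=
  let ids : PySem.Set String := PySem.Set.ofList (gene_list.map genomeId)
  let in_MAGs := MAGs.any (fun m => PySem.Set.contains ids m)
  let in_Isolates := genomes.any (fun g => PySem.Set.contains ids g)
  PySem.Dict.get?
    (PySem.Dict.ofList [((true, true), "Both"), ((false, true), "Isolates"), ((true, false), "MAGs")])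
    (in_MAGs, in_Isolates)

-- ===== PRECONDITION & SPEC =====
def Spec_present_in (gene_list : List String) (genomes : List String) (MAGs : List String) (out : Option String) : Prop := out = present_in_alt gene_list genomes MAGs
instance (gene_list : List String) (genomes : List String) (MAGs : List String) (out : Option String) : Decidable (Spec_present_in gene_list genomes MAGs out) := by unfold Spec_present_in; infer_instance

-- ===== CLAIM (what is proved, stated in full; the proofs are below) =====
def Claim_equal_present_in : Prop := ∀ (gene_list : List String) (genomes : List String) (MAGs : List String), Dom_present_in gene_list genomes MAGs → Spec_present_in gene_list genomes MAGs (present_in gene_list genomes MAGs)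

-- ===== LEMMAS AND PROOFS =====

-- scanning ids against ys equals scanning ys against the set of ids (both decide set overlap)
lemma any_swap (xs ys : List String) :
    xs.any (fun x => ys.contains x)
      = ys.any (fun y => PySem.Set.contains (PySem.Set.ofList xs) y) := by
  rw [Bool.eq_iff_iff]
  simp only [List.any_eq_true, PySem.Set.contains_iff, PySem.Set.mem_ofList,
    List.contains_iff_mem]
  exact ⟨fun ⟨x, hx, hy⟩ => ⟨x, hy, hx⟩, fun ⟨y, hy, hx⟩ => ⟨y, hx, hy⟩⟩

-- the loop of A computes the flat classification of the two overlap flags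
lemma loopA_eq_flags (genomes MAGs : List String) (ip : Bool)
    (hip : ∀ g : String, (ip && genomes.contains g) = genomes.contains g) :
    ∀ (gs : List String) (m i : Bool), (m && i) = false →
      presentLoopA genomes MAGs ip gs m i =
        (if ((m || (gs.map genomeId).any (fun gid => MAGs.contains gid)) &&
             (i || (gs.map genomeId).any (fun gid => genomes.contains gid))) then some "Both"
         else if (i || (gs.map genomeId).any (fun gid => genomes.contains gid)) then some "Isolates"
         else if (m || (gs.map genomeId).any (fun gid => MAGs.contains gid)) then some "MAGs"
         else none) := by
  intro gs
  induction gs with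
  | nil =>
      intro m i h
      cases m <;> cases i <;> simp_all [presentLoopA]
  | cons g rest ih =>
      intro m i h
      simp only [presentLoopA, List.map_cons, List.any_cons]
      have e1 : (if ip then (if genomes.contains (genomeId g) then true else i) else i)
          = (genomes.contains (genomeId g) || i) := by
        have hg := hip (genomeId g)
        cases ip <;> cases hcI : genomes.contains (genomeId g) <;> simp_all
      have e2 : (if MAGs.contains (genomeId g) then true else m)
          = (MAGs.contains (genomeId g) || m) := by
        cases MAGs.contains (genomeId g) <;> simp
      have hMx : (m || (MAGs.contains (genomeId g) || (rest.map genomeId).any (fun gid => MAGs.contains gid)))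
          = ((MAGs.contains (genomeId g) || m) || (rest.map genomeId).any (fun gid => MAGs.contains gid)) := by
        cases m <;> cases MAGs.contains (genomeId g) <;> simp
      have hIx : (i || (genomes.contains (genomeId g) || (rest.map genomeId).any (fun gid => genomes.contains gid)))
          = ((genomes.contains (genomeId g) || i) || (rest.map genomeId).any (fun gid => genomes.contains gid)) := by
        cases i <;> cases genomes.contains (genomeId g) <;> simp
      rw [e1, e2]
      simp only [hMx, hIx]
      by_cases hb : ((genomes.contains (genomeId g) || i) && (MAGs.contains (genomeId g) || m)) = true
      · rw [if_pos hb]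
        obtain ⟨h1, h2⟩ := Bool.and_eq_true_iff.mp hb
        simp only [h1, h2, Bool.true_or, Bool.and_self, if_true]
      · rw [if_neg hb]
        have hmi : ((MAGs.contains (genomeId g) || m) && (genomes.contains (genomeId g) || i)) = false := by
          rw [Bool.and_comm]
          exact Bool.eq_false_iff.mpr hb
        rw [ih _ _ hmi]

theorem present_in_spec : Claim_equal_present_in := by
  intro gene_list genomes MAGs _
  unfold Spec_present_in present_in present_in_alt
  have hip : ∀ g : String,
      ((if genomes.length == 0 then false else true) && genomes.contains g) = genomes.contains g := by
    intro g; cases genomes <;> simp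
  rw [loopA_eq_flags genomes MAGs _ hip gene_list false false rfl]
  simp only [Bool.false_or]
  rw [← any_swap (gene_list.map genomeId) MAGs, ← any_swap (gene_list.map genomeId) genomes]
  cases (gene_list.map genomeId).any (fun gid => MAGs.contains gid) <;>
    cases (gene_list.map genomeId).any (fun gid => genomes.contains gid) <;> rfl
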